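-- pv_equiv track=rewrite | github.com/Ironhead1002/simform-assignments | Python/GCD_updated.py | integertoword
-- ===== SOURCE A (Python) =====
-- def integertoword(num):
--     """This function is used to convert integers to words"""
--     lst1 = ['zero', 'one', 'two', 'three', 'four', 'five', 'six', 'seven', 'eight', 'nine']
--
--     if num == 0:
--         return ""
--     else:
--         ans1 = lst1[num%10]
--         final_ans = integertoword(int(num/10)) + ans1
--     return final_ans
-- ===== SOURCE B (Python) =====
-- def integertoword(num):
--     """This function is used to convert integers to words"""
--     lst1 = ['zero', 'one', 'two', 'three', 'four', 'five', 'six', 'seven', 'eight', 'nine']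
--     result = ""
--     while num != 0:
--         result = lst1[num % 10] + result
--         num = int(num / 10)
--     return result
-- ===== Notes on version B (the rewrite author's own statement) =====
-- stated objective: idiomatic
-- what changed: Replaces the recursion with an explicit iterative while-loop that prepends each digit's word to an accumulator string, keeping the exact num % 10 / int(num/10) arithmetic.
import Mathlib
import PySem

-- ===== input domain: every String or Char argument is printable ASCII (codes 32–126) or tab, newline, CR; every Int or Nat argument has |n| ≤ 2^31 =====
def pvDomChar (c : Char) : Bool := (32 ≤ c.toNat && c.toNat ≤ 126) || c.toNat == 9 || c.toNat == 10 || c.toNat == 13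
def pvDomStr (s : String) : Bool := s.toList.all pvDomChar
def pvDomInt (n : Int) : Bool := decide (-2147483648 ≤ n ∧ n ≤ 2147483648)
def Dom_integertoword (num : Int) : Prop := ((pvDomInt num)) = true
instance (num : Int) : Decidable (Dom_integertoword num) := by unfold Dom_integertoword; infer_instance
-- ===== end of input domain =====

-- B replaces A's recursion with an iterative prepend-accumulator loop (same arithmetic: num % 10 and
-- truncating int(num/10)); objective: idiomatic, same cost.


-- the digit-word table lst1 shared by both Pythons
def pvLst1 : List String := ["zero", "one", "two", "three", "four", "five", "six", "seven", "eight", "nine"]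

-- termination measure for both ports: int(num/10) shrinks |num|
theorem pvTdiv_lt (n : Int) (h : ¬ n = 0) : (Int.tdiv n 10).natAbs < n.natAbs := by
  have : (Int.tdiv n 10).natAbs = Nat.div n.natAbs 10 := by simp [Int.natAbs_tdiv]
  rw [this]
  exact Nat.div_lt_self (by omega) (by norm_num)

-- ===== PORT A =====
-- Recursive, exactly A's shape.  num % 10 = PySem.Int.mod (Python floor-mod); int(num/10) = Int.tdiv
-- (truncation toward zero: exact for |num| ≤ 2^31, where the float num/10 is exact enough);
-- lst1[num%10] via pyGet? (the index is always in range since 0 ≤ num%10 < 10).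
def integertoword (num : Int) : String :=
  if num = 0 then ""
  else
    let ans1 := (PySem.List.pyGet? pvLst1 (PySem.Int.mod num 10)).getD ""
    integertoword (Int.tdiv num 10) ++ ans1
termination_by num.natAbs
decreasing_by exact pvTdiv_lt num (by assumption)

-- ===== PORT B =====
-- B's while-loop as a tail-recursive helper carrying the accumulator `result`.
def pvLoop (num : Int) (result : String) : String :=
  if num = 0 then result
  else pvLoop (Int.tdiv num 10) ((PySem.List.pyGet? pvLst1 (PySem.Int.mod num 10)).getD "" ++ result)
termination_by num.natAbs
decreasing_by exact pvTdiv_lt num (by assumption)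

def integertoword_alt (num : Int) : String := pvLoop num ""

-- ===== PRECONDITION & SPEC =====
def Spec_integertoword (num : Int) (out : String) : Prop := out = integertoword_alt num
instance (num : Int) (out : String) : Decidable (Spec_integertoword num out) := by unfold Spec_integertoword; infer_instance

-- ===== CLAIM (what is proved, stated in full; the proofs are below) =====
def Claim_equal_integertoword : Prop := ∀ (num : Int), Dom_integertoword num → Spec_integertoword num (integertoword num)

-- ===== LEMMAS AND PROOFS =====
-- loop invariant: the accumulator is a suffix; pvLoop n r = integertoword n ++ r
theorem pvLoop_eq (n : Int) (r : String) : pvLoop n r = integertoword n ++ r := by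
  induction n using integertoword.induct generalizing r with
  | case1 => rw [pvLoop, integertoword]; simp
  | case2 n hn ih =>
    rw [pvLoop, integertoword]
    simp only [if_neg hn]
    rw [ih]
    simp [String.append_assoc]

-- ===== VERDICT (by name: the statement is the Claim_ definition above) =====
theorem integertoword_spec : Claim_equal_integertoword := by
  intro num _
  unfold Spec_integertoword integertoword_alt
  rw [pvLoop_eq]
  simp
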